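-- pv_equiv track=rewrite | github.com/arveenkumar55/UIT-python-Assignments | UIT_Python_Assignments/AI_Ass_2.py | not_bad
-- ===== SOURCE A (Python) =====
-- def not_bad(s):
--     value=''
--     value1=''
--     index=0
--     data = s.split(' ')
--     flag=False
--     flag1=False
--     for i in range(0,len(data)):
--         if(data[i]=="not"):
--             index=i
--             while i< len(data):
--                 value1=value1+" "+data[i]
--                 if data[i]=="bad":
--                     flag=True
--                     value=value+" "+"good"
--                     return value
--                     break
--                 if data[i]=="bad!":
--                     flag=True
--                     value=value+" "+"good!"
--                     return value
--                     break
--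
--                 i=i+1
--             return value1
--         if i<len(data) and flag1:
--             value=value+" "+data[i]
--             value1=value1+" "+data[i]
--         else:
--             flag1=True
--             value=data[i]
--             value1=data[i]
--         if flag== True:
--             break
-- ===== SOURCE B (Python) =====
-- def not_bad(s):
--     data = s.split(' ')
--     if 'not' not in data:
--         return None
--     i = data.index('not')
--     prefix = ' '.join(data[:i])
--     rest = data[i:]
--     ib = rest.index('bad') if 'bad' in rest else len(rest)
--     ibx = rest.index('bad!') if 'bad!' in rest else len(rest)
--     if min(ib, ibx) == len(rest):
--         return prefix + ' ' + ' '.join(rest)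
--     return prefix + (' good' if ib < ibx else ' good!')
-- ===== Notes on version B (the rewrite author's own statement) =====
-- stated objective: simpler
-- what changed: A's stateful single pass (four accumulator variables value/value1/flag/flag1 plus a nested while loop rebuilding strings token by token) is replaced by index arithmetic: locate 'not' with list.index, compare the indices of 'bad' and 'bad!' in the tail, and assemble the result from slices and ' '.join.
import Mathlib
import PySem

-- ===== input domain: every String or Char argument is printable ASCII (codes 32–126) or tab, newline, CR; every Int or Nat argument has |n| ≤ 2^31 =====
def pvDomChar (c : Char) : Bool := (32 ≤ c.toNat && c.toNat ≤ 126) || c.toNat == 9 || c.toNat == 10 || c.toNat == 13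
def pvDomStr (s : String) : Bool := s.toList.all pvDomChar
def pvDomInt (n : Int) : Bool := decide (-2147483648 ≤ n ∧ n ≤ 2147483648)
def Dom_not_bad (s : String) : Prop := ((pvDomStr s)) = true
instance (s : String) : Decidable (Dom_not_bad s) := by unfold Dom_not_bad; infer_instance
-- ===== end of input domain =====

-- B replaces A's stateful accumulator loop (value/value1/flag/flag1 plus an inner while)
-- with index arithmetic: find 'not' with index, compare the indices of 'bad' and 'bad!'
-- in the tail, and build the answer from slices and joins. Objective: simpler.

-- ===== PORT A =====
-- inner `while i < len(data)` loop of A, scanning from the position of "not";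
-- returns value+" good"/" good!" on the first "bad"/"bad!", else the final value1
def notBadWhile (l : List String) (value value1 : String) : String :=
  match l with
  | [] => value1
  | x :: xs =>
    let value1 := value1 ++ " " ++ x
    if x == "bad" then value ++ " " ++ "good"
    else if x == "bad!" then value ++ " " ++ "good!"
    else notBadWhile xs value value1

-- outer `for i in range(0, len(data))` loop of A; `i < len(data)` in A's second test is
-- always true inside the loop, so only flag1 is tested; flag is always False when tested
def notBadLoop (l : List String) (value value1 : String) (flag flag1 : Bool) : Option String :=
  match l with
  | [] => none
  | x :: xs =>
    if x == "not" then some (notBadWhile (x :: xs) value value1)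
    else
      let st := if flag1 then (value ++ " " ++ x, value1 ++ " " ++ x, flag1)
                else (x, x, true)
      if flag then none   -- `break`: the loop ends and A falls off the end, returning None
      else notBadLoop xs st.1 st.2.1 flag st.2.2

def not_bad (s : String) : Option String :=
  let data := (PySem.Str.split? s " ").getD []   -- sep " " ≠ "", so split? is always `some`
  notBadLoop data "" "" false false

-- ===== PORT B =====
def not_bad_alt (s : String) : Option String :=
  let data := (PySem.Str.split? s " ").getD []
  if "not" ∈ data then
    let i := (PySem.List.index? data "not").getD 0
    let pre := PySem.Str.join " " (PySem.List.slice data none (some (i : Int)))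
    let rest := PySem.List.slice data (some (i : Int)) none
    let ib := if "bad" ∈ rest then (PySem.List.index? rest "bad").getD 0 else rest.length
    let ibx := if "bad!" ∈ rest then (PySem.List.index? rest "bad!").getD 0 else rest.length
    if min ib ibx == rest.length then some (pre ++ " " ++ PySem.Str.join " " rest)
    else if ib < ibx then some (pre ++ " good") else some (pre ++ " good!")
  else none

-- ===== PRECONDITION & SPEC =====
def Spec_not_bad (s : String) (out : Option String) : Prop := out = not_bad_alt s
instance (s : String) (out : Option String) : Decidable (Spec_not_bad s out) := by unfold Spec_not_bad; infer_instance

-- ===== CLAIM (what is proved, stated in full; the proofs are below) =====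
def Claim_equal_not_bad : Prop := ∀ (s : String), Dom_not_bad s → Spec_not_bad s (not_bad s)

-- ===== LEMMAS AND PROOFS =====

-- abbreviation used only in proofs
def sj (l : List String) : String := PySem.Str.join " " l

theorem string_toList_inj {a b : String} (h : a.toList = b.toList) : a = b := by
  have := congrArg String.ofList h; simpa using this

theorem sj_singleton (x : String) : sj [x] = x := by
  simp [sj, PySem.Str.join, PySem.Chars.join_singleton]

theorem sj_cons_cons (x y : String) (l : List String) :
    sj (x :: y :: l) = x ++ " " ++ sj (y :: l) := by
  apply string_toList_inj
  simp [sj, PySem.Str.join, PySem.Chars.join_cons_cons]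

theorem sj_append_singleton (p : List String) (x : String) (hp : p ≠ []) :
    sj (p ++ [x]) = sj p ++ " " ++ x := by
  induction p with
  | nil => exact absurd rfl hp
  | cons a p ih =>
    cases p with
    | nil => simp [sj_cons_cons, sj_singleton]
    | cons b p =>
      have := ih (by simp)
      simp only [List.cons_append] at *
      rw [sj_cons_cons, sj_cons_cons a b, this]
      simp [String.append_assoc]

theorem foldl_sj (rest : List String) (v : String) (h : rest ≠ []) :
    List.foldl (fun a x => a ++ " " ++ x) v rest = v ++ " " ++ sj rest := by
  induction rest generalizing v with
  | nil => exact absurd rfl h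
  | cons x xs ih =>
    cases xs with
    | nil => simp [List.foldl, sj_singleton]
    | cons y ys =>
      calc List.foldl (fun a x => a ++ " " ++ x) v (x :: y :: ys)
          = List.foldl (fun a x => a ++ " " ++ x) (v ++ " " ++ x) (y :: ys) := rfl
        _ = v ++ " " ++ x ++ " " ++ sj (y :: ys) := ih _ (by simp)
        _ = v ++ " " ++ sj (x :: y :: ys) := by
              rw [sj_cons_cons]; simp [String.append_assoc]

-- index of w in the tail, defaulted to the length when absent (B's ib / ibx)
def idxD (l : List String) (w : String) : Nat :=
  if w ∈ l then (PySem.List.index? l w).getD 0 else l.length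

theorem idxD_cons {x w : String} (xs : List String) (h : x ≠ w) :
    idxD (x :: xs) w = idxD xs w + 1 := by
  unfold idxD
  by_cases hm : w ∈ xs
  · rcases hx : PySem.List.index? xs w with _ | k
    · exact absurd hm ((PySem.List.index?_eq_none_iff xs w).mp hx)
    · rw [if_pos (List.mem_cons_of_mem _ hm), if_pos hm,
        PySem.List.index?_cons_of_ne xs h, hx]
      rfl
  · have hm' : w ∉ x :: xs := by simp [hm, Ne.symm h]
    rw [if_neg hm', if_neg hm]; simp

theorem idxD_self (x : String) (xs : List String) : idxD (x :: xs) x = 0 := by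
  unfold idxD
  rw [if_pos (List.mem_cons_self), PySem.List.index?_cons_self]
  rfl

-- characterisation of A's inner while loop by the indices of "bad" and "bad!"
theorem notBadWhile_eq (rest : List String) (v v1 : String) :
    notBadWhile rest v v1 =
      (if min (idxD rest "bad") (idxD rest "bad!") = rest.length
       then List.foldl (fun a x => a ++ " " ++ x) v1 rest
       else if idxD rest "bad" < idxD rest "bad!" then v ++ " " ++ "good"
       else v ++ " " ++ "good!") := by
  induction rest generalizing v1 with
  | nil => simp [notBadWhile, idxD]
  | cons x xs ih =>
    by_cases hb : x = "bad"
    · subst hb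
      rw [idxD_self, idxD_cons xs (by decide)]
      have h1 : notBadWhile ("bad" :: xs) v v1 = v ++ " " ++ "good" := by
        simp [notBadWhile]
      rw [h1, List.length_cons, if_neg (by omega), if_pos (by omega)]
    · by_cases hbx : x = "bad!"
      · subst hbx
        rw [idxD_self, idxD_cons xs (by decide)]
        have h1 : notBadWhile ("bad!" :: xs) v v1 = v ++ " " ++ "good!" := by
          simp [notBadWhile]
        rw [h1, List.length_cons, if_neg (by omega), if_neg (by omega)]
      · have hbeq : ((x : String) == "bad") = false := by simp [hb]
        have hbxeq : ((x : String) == "bad!") = false := by simp [hbx]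
        have h1 : notBadWhile (x :: xs) v v1 = notBadWhile xs v (v1 ++ " " ++ x) := by
          simp [notBadWhile, hbeq, hbxeq]
        have h2 : List.foldl (fun a x => a ++ " " ++ x) v1 (x :: xs)
            = List.foldl (fun a x => a ++ " " ++ x) (v1 ++ " " ++ x) xs := rfl
        rw [h1, ih (v1 ++ " " ++ x), idxD_cons xs hb, idxD_cons xs hbx,
          List.length_cons, h2]
        generalize idxD xs "bad" = a
        generalize idxD xs "bad!" = b
        by_cases hmin : min a b = xs.length
        · rw [if_pos hmin, if_pos (show min (a+1) (b+1) = xs.length + 1 by omega)]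
        · rw [if_neg hmin, if_neg (show ¬ min (a+1) (b+1) = xs.length + 1 by omega)]
          by_cases hlt : a < b
          · rw [if_pos hlt, if_pos (show a+1 < b+1 by omega)]
          · rw [if_neg hlt, if_neg (show ¬ a+1 < b+1 by omega)]

-- the outer loop, characterised by the position of the first "not":
-- p is the list of tokens already consumed, value = value1 = sj p, flag1 = (p ≠ [])
theorem notBadLoop_eq (l p : List String) :
    notBadLoop l (sj p) (sj p) false (!p.isEmpty) =
      match PySem.List.index? l "not" with
      | none => none
      | some i => some (notBadWhile (l.drop i) (sj (p ++ l.take i)) (sj (p ++ l.take i))) := by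
  induction l generalizing p with
  | nil => simp [notBadLoop, PySem.List.index?]
  | cons x xs ih =>
    by_cases hx : x = "not"
    · subst hx
      rw [PySem.List.index?_cons_self]
      simp [notBadLoop]
    · have hbeq : ((x : String) == "not") = false := by simp [hx]
      have hstep : (if (!p.isEmpty) = true then (sj p ++ " " ++ x, sj p ++ " " ++ x, !p.isEmpty)
          else (x, x, true)) = (sj (p ++ [x]), sj (p ++ [x]), true) := by
        cases p with
        | nil => simp [sj_singleton]
        | cons a q =>
          rw [sj_append_singleton (a :: q) x (by simp)]
          simp
      simp only [notBadLoop, hbeq, Bool.false_eq_true, if_false, hstep]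
      have h2 : (!(p ++ [x]).isEmpty) = true := by simp
      have hih := ih (p ++ [x])
      rw [h2] at hih
      rw [hih, PySem.List.index?_cons_of_ne xs hx]
      rcases PySem.List.index? xs "not" with _ | i
      · rfl
      · simp [List.take_succ_cons, List.drop_succ_cons, List.append_assoc]

theorem index?_lt_length {l : List String} {v : String} {k : Nat}
    (h : PySem.List.index? l v = some k) : k < l.length := by
  obtain ⟨hk, _⟩ := PySem.List.getElem_of_index?_eq_some h
  exact hk

theorem core_eq (data : List String) :
    notBadLoop data "" "" false false =
      (if "not" ∈ data then
        let i := (PySem.List.index? data "not").getD 0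
        let pre := PySem.Str.join " " (PySem.List.slice data none (some (i : Int)))
        let rest := PySem.List.slice data (some (i : Int)) none
        let ib := if "bad" ∈ rest then (PySem.List.index? rest "bad").getD 0 else rest.length
        let ibx := if "bad!" ∈ rest then (PySem.List.index? rest "bad!").getD 0 else rest.length
        if min ib ibx == rest.length then some (pre ++ " " ++ PySem.Str.join " " rest)
        else if ib < ibx then some (pre ++ " good") else some (pre ++ " good!")
      else none) := by
  have hstart := notBadLoop_eq data []
  have h0 : sj ([] : List String) = "" := by
    simp [sj, PySem.Str.join, PySem.Chars.join_nil]
  rw [h0] at hstart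
  simp only [List.nil_append, List.isEmpty_nil, Bool.not_true] at hstart
  rw [hstart]
  by_cases hmem : "not" ∈ data
  · rcases hidx : PySem.List.index? data "not" with _ | i
    · exact absurd hmem ((PySem.List.index?_eq_none_iff data "not").mp hidx)
    · have hi : i < data.length := index?_lt_length hidx
      rw [if_pos hmem]
      simp only [Option.getD_some,
        PySem.List.slice_to_natCast, PySem.List.slice_from_natCast]
      rw [notBadWhile_eq]
      have hrestne : data.drop i ≠ [] := by
        intro h
        have := List.drop_eq_nil_iff.mp h
        omega
      have hib : (if "bad" ∈ data.drop i then (PySem.List.index? (data.drop i) "bad").getD 0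
          else (data.drop i).length) = idxD (data.drop i) "bad" := rfl
      have hibx : (if "bad!" ∈ data.drop i then (PySem.List.index? (data.drop i) "bad!").getD 0
          else (data.drop i).length) = idxD (data.drop i) "bad!" := rfl
      simp only [hib, hibx, beq_iff_eq]
      by_cases hmin : min (idxD (data.drop i) "bad") (idxD (data.drop i) "bad!")
          = (data.drop i).length
      · rw [if_pos hmin, if_pos hmin, foldl_sj _ _ hrestne]
        rfl
      · rw [if_neg hmin, if_neg hmin]
        have hg : ∀ t : String, t ++ " " ++ "good" = t ++ " good" := by
          intro t; rw [String.append_assoc]; rfl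
        have hg2 : ∀ t : String, t ++ " " ++ "good!" = t ++ " good!" := by
          intro t; rw [String.append_assoc]; rfl
        by_cases hlt : idxD (data.drop i) "bad" < idxD (data.drop i) "bad!"
        · rw [if_pos hlt, if_pos hlt, hg]; rfl
        · rw [if_neg hlt, if_neg hlt, hg2]; rfl
  · rw [if_neg hmem]
    rcases hidx : PySem.List.index? data "not" with _ | i
    · rfl
    · have : "not" ∈ data := (PySem.List.index?_isSome_iff data "not").mp (by rw [hidx]; rfl)
      exact absurd this hmem

-- ===== VERDICT (by name: the statement is the Claim_ definition above) =====
theorem not_bad_spec : Claim_equal_not_bad := by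
  intro s _
  unfold Spec_not_bad not_bad not_bad_alt
  exact core_eq _
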